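-- pv_equiv track=rewrite | github.com/funkymoose/Infosys_probs | Practice Problems/Level2/Practice problem 13.py | close_number
-- ===== SOURCE A (Python) =====
-- def close_number(num1,num2,num3):
--     mylist = [num1,num2,num3]
--     l1 = []
--     for i in range(len(mylist)):
--         for j in range(i + 1, len(mylist)):
--             l = [mylist[i], mylist[j]]
--             l1.append(max(l)-min(l))
--
--     l1.sort()
--     if l1[0]<=1 and l1[1]>=2 and l1[2]:
--         return True
--     else:
--         return False
-- ===== SOURCE B (Python) =====
-- def close_number(num1, num2, num3):
--     x, y, z = sorted((num1, num2, num3))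
--     g1 = y - x
--     g2 = z - y
--     return min(g1, g2) <= 1 and max(g1, g2) >= 2
-- ===== Notes on version B (the rewrite author's own statement) =====
-- stated objective: simpler
-- what changed: Instead of two nested index loops that build the list of all pairwise max-min differences, sort it and index it, B sorts the three inputs once and tests the two consecutive gaps g1=y-x, g2=z-y via min(g1,g2)<=1 and max(g1,g2)>=2.
import Mathlib
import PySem

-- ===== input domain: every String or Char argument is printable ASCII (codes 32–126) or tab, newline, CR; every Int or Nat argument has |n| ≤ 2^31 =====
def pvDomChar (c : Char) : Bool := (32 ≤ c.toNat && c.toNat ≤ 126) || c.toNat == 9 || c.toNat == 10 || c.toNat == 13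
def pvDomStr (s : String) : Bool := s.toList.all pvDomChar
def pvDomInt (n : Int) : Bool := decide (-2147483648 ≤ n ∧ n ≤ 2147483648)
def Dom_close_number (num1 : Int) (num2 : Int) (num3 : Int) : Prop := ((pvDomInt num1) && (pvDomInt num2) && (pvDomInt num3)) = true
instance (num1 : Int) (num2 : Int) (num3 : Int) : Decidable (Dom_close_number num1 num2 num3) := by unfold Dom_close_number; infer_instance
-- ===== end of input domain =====

-- B sorts the three inputs once and tests the two consecutive gaps, instead of
-- generating all pairwise differences, sorting them and indexing (objective: simpler).


-- ===== PORT A =====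
-- literal port of A: nested index loops build l1 = [max-min of each pair], sort l1, test l1[0], l1[1], l1[2]
def close_number (num1 : Int) (num2 : Int) (num3 : Int) : Bool :=
  let mylist : List Int := [num1, num2, num3]
  let l1 : List Int :=
    (PySem.List.pyRange 0 3 1).foldl (fun acc i =>
      (PySem.List.pyRange (i + 1) 3 1).foldl (fun acc j =>
        let l : List Int := [PySem.List.pyGetD mylist i 0, PySem.List.pyGetD mylist j 0]
        acc ++ [((PySem.List.max? l (fun x => x)).getD 0 - (PySem.List.min? l (fun x => x)).getD 0)]) acc) []
  let l1 := PySem.List.sorted l1 (fun x => x)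
  if PySem.List.pyGetD l1 0 0 ≤ 1 ∧ 2 ≤ PySem.List.pyGetD l1 1 0 ∧ PySem.List.pyGetD l1 2 0 ≠ 0 then
    true
  else
    false

-- ===== PORT B =====
-- literal port of Source B: sorted inputs x <= y <= z, gaps g1 = y-x, g2 = z-y
def close_number_alt (num1 : Int) (num2 : Int) (num3 : Int) : Bool :=
  let s := PySem.List.sorted [num1, num2, num3] (fun x => x)
  let x := PySem.List.pyGetD s 0 0
  let y := PySem.List.pyGetD s 1 0
  let z := PySem.List.pyGetD s 2 0
  let g1 := y - x
  let g2 := z - y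
  decide (min g1 g2 ≤ 1) && decide (2 ≤ max g1 g2)

-- ===== PRECONDITION & SPEC =====
def Spec_close_number (num1 : Int) (num2 : Int) (num3 : Int) (out : Bool) : Prop := out = close_number_alt num1 num2 num3
instance (num1 : Int) (num2 : Int) (num3 : Int) (out : Bool) : Decidable (Spec_close_number num1 num2 num3 out) := by unfold Spec_close_number; infer_instance

-- ===== CLAIM =====
def Claim_equal_close_number : Prop := ∀ (num1 : Int) (num2 : Int) (num3 : Int), Dom_close_number num1 num2 num3 → Spec_close_number num1 num2 num3 (close_number num1 num2 num3)

-- ===== LEMMAS AND PROOFS =====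

def pvDiffTest (l1 : List Int) : Bool :=
  if PySem.List.pyGetD l1 0 0 ≤ 1 ∧ 2 ≤ PySem.List.pyGetD l1 1 0 ∧ PySem.List.pyGetD l1 2 0 ≠ 0 then
    true
  else
    false

theorem sorted3 (a b c d e f : Int) (h : [d,e,f].Perm [a,b,c]) (hde : d ≤ e) (hef : e ≤ f) :
    PySem.List.sorted [a, b, c] (fun x => x) = [d,e,f] := by
  refine PySem.List.sorted_id_eq_of_perm_of_pairwise _ _ h ?_
  simp only [List.pairwise_cons, List.mem_cons, List.not_mem_nil]
  refine ⟨?_, ?_, by simp⟩ <;> (intros x hx; rcases hx with h1|h1|h1 <;> simp_all <;> omega)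

theorem closeA_eq (a b c : Int) :
    close_number a b c =
      pvDiffTest (PySem.List.sorted [max a b - min a b, max a c - min a c, max b c - min b c] (fun x => x)) := by
  unfold close_number pvDiffTest
  simp only []
  have h : (PySem.List.pyRange 0 3 1).foldl (fun acc i =>
      (PySem.List.pyRange (i + 1) 3 1).foldl (fun acc j =>
        acc ++ [((PySem.List.max? [PySem.List.pyGetD [a,b,c] i 0, PySem.List.pyGetD [a,b,c] j 0] (fun x => x)).getD 0
                 - (PySem.List.min? [PySem.List.pyGetD [a,b,c] i 0, PySem.List.pyGetD [a,b,c] j 0] (fun x => x)).getD 0)]) acc) ([]:List Int)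
    = [max a b - min a b, max a c - min a c, max b c - min b c] := by
    simp only [show PySem.List.pyRange 0 3 1 = [0,1,2] from by decide, List.foldl]
    simp only [show PySem.List.pyRange (0+1) 3 1 = [1,2] from by decide,
               show PySem.List.pyRange (1+1) 3 1 = [2] from by decide,
               show PySem.List.pyRange (2+1) 3 1 = [] from by decide, List.foldl]
    simp [PySem.List.max?, PySem.List.min?, max_def, min_def,
          PySem.List.pyGetD, PySem.List.pyGet?, PySem.List.pyIdx?]
    constructor; · split_ifs <;> simp <;> omega
    constructor <;> split_ifs <;> simp <;> omega
  rw [h]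

theorem closeA_swap12 (a b c : Int) : close_number a b c = close_number b a c := by
  rw [closeA_eq, closeA_eq, max_comm b a, min_comm b a,
      PySem.List.sorted_eq_sorted_of_perm
        [max a b - min a b, max a c - min a c, max b c - min b c]
        [max a b - min a b, max b c - min b c, max a c - min a c]
        (fun x => x) (fun _ _ h => h)
        (List.Perm.cons _ (List.Perm.swap _ _ _))]

theorem closeA_swap23 (a b c : Int) : close_number a b c = close_number a c b := by
  rw [closeA_eq, closeA_eq, max_comm c b, min_comm c b,
      PySem.List.sorted_eq_sorted_of_perm
        [max a b - min a b, max a c - min a c, max b c - min b c]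
        [max a c - min a c, max a b - min a b, max b c - min b c]
        (fun x => x) (fun _ _ h => h)
        (List.Perm.swap _ _ _)]

theorem altB_swap12 (a b c : Int) : close_number_alt a b c = close_number_alt b a c := by
  unfold close_number_alt
  rw [PySem.List.sorted_eq_sorted_of_perm [a,b,c] [b,a,c] (fun x => x) (fun _ _ h => h)
      (List.Perm.swap _ _ _)]

theorem altB_swap23 (a b c : Int) : close_number_alt a b c = close_number_alt a c b := by
  unfold close_number_alt
  rw [PySem.List.sorted_eq_sorted_of_perm [a,b,c] [a,c,b] (fun x => x) (fun _ _ h => h)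
      (List.Perm.cons _ (List.Perm.swap _ _ _))]

theorem gaps_case (a b c : Int) (hab : a ≤ b) (hbc : b ≤ c) :
    close_number a b c = close_number_alt a b c := by
  have hac : a ≤ c := hab.trans hbc
  rw [closeA_eq, max_eq_right hab, min_eq_left hab, max_eq_right hac, min_eq_left hac,
      max_eq_right hbc, min_eq_left hbc]
  unfold close_number_alt
  simp only []
  rw [sorted3 a b c a b c (List.Perm.refl _) hab hbc]
  rcases le_total (b - a) (c - b) with h | h
  · rw [sorted3 (b-a) (c-a) (c-b) (b-a) (c-b) (c-a)
        (List.Perm.cons _ (List.Perm.swap _ _ _)) (by omega) (by omega)]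
    unfold pvDiffTest
    simp [PySem.List.pyGetD, PySem.List.pyGet?, PySem.List.pyIdx?, min_def, max_def]
    split_ifs <;>
      (simp only [← decide_not, ← Bool.decide_and]; rw [decide_eq_decide]; omega)
  · rw [sorted3 (b-a) (c-a) (c-b) (c-b) (b-a) (c-a)
        ((List.Perm.swap _ _ _).trans (List.Perm.cons _ (List.Perm.swap _ _ _))) (by omega) (by omega)]
    unfold pvDiffTest
    simp [PySem.List.pyGetD, PySem.List.pyGet?, PySem.List.pyIdx?, min_def, max_def]
    split_ifs <;>
      (simp only [← decide_not, ← Bool.decide_and]; rw [decide_eq_decide]; omega)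

-- ===== VERDICT =====
theorem close_number_spec : Claim_equal_close_number := by
  intro a b c _
  unfold Spec_close_number
  rcases le_total a b with hab | hab <;> rcases le_total b c with hbc | hbc
  · exact gaps_case a b c hab hbc
  · rcases le_total a c with hac | hac
    · rw [closeA_swap23, altB_swap23]; exact gaps_case a c b hac hbc
    · rw [closeA_swap23, closeA_swap12, altB_swap23, altB_swap12]
      exact gaps_case c a b hac hab
  · rcases le_total a c with hac | hac
    · rw [closeA_swap12, altB_swap12]; exact gaps_case b a c hab hac
    · rw [closeA_swap12, closeA_swap23, altB_swap12, altB_swap23]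
      exact gaps_case b c a hbc hac
  · rw [closeA_swap12, closeA_swap23, closeA_swap12, altB_swap12, altB_swap23, altB_swap12]
    exact gaps_case c b a hbc hab
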